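-- pv_equiv track=rewrite | github.com/SkyGlider/FIT1045 | Week 4 Tutorial/T4Task2.py | vowel_check
-- ===== SOURCE A (Python) =====
-- def vowel_check(word):
--     word = word.lower()
--     word = list(word)
--     vowels = ['a','e','i','o','u']
--     no_v = 0
--     for i in word :
--         if i in vowels:
--             no_v += 1
--
--     no_c = len(word) - no_v
--
--     if no_v > no_c :
--
--         return True
--
--     else:
--
--         return False
-- ===== SOURCE B (Python) =====
-- def vowel_check(word):
--     w = word.lower()
--     total = sum(w.count(v) for v in 'aeiou')
--     return 2 * total > len(w)
-- ===== Notes on version B (the rewrite author's own statement) =====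
-- stated objective: faster
-- what changed: Instead of one Python-level pass over the characters with a membership branch and a consonant count, B scans the word once per vowel with str.count (a C-level scan), sums the five counts and compares 2*vowels > len(word).
import Mathlib
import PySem

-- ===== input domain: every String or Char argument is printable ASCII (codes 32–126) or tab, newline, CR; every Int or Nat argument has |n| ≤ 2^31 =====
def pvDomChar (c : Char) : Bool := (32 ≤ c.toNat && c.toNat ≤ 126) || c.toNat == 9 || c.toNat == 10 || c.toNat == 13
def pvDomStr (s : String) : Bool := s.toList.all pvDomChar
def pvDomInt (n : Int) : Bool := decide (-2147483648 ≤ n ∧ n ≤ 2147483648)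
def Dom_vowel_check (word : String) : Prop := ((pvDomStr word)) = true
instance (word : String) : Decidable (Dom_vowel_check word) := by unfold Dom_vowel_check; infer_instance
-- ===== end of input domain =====

-- B replaces A's single character loop with a per-vowel str.count sum and the comparison 2*vowels > len; same behaviour, alternative traversal.

-- ===== PORT A =====
def vowel_check (word : String) : Bool :=
  let w := (PySem.Str.lower word).toList
  let vowels : List Char := ['a','e','i','o','u']
  let no_v : Int := w.foldl (fun acc i => if vowels.contains i then acc + 1 else acc) 0
  let no_c : Int := (w.length : Int) - no_v
  if no_v > no_c then true else false

-- ===== PORT B =====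
def vowel_check_alt (word : String) : Bool :=
  let w := PySem.Str.lower word
  let total : Int := (("aeiou".toList).map (fun v => (PySem.Str.count w (String.ofList [v]) : Int))).sum
  decide (2 * total > (w.toList.length : Int))

-- ===== PRECONDITION & SPEC =====
def Spec_vowel_check (word : String) (out : Bool) : Prop := out = vowel_check_alt word
instance (word : String) (out : Bool) : Decidable (Spec_vowel_check word out) := by unfold Spec_vowel_check; infer_instance

-- ===== CLAIM (what is proved, stated in full; the proofs are below) =====
def Claim_equal_vowel_check : Prop := ∀ (word : String), Dom_vowel_check word → Spec_vowel_check word (vowel_check word)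

-- ===== LEMMAS AND PROOFS =====

-- Python's s.count(c) for a single-character needle is the element count.
theorem chars_count_go_single (c : Char) : ∀ (fuel : Nat) (s : List Char) (acc : Nat),
    s.length ≤ fuel → PySem.Chars.count.go [c] fuel s acc = acc + s.count c := by
  intro fuel
  induction fuel with
  | zero => intro s acc h; cases s with
    | nil => simp [PySem.Chars.count.go]
    | cons x t => simp at h
  | succ n ih =>
    intro s acc h
    cases s with
    | nil => simp [PySem.Chars.count.go]
    | cons x t =>
      simp only [PySem.Chars.count.go]
      by_cases hx : c = x
      · subst hx
        simp only [List.isPrefixOf, BEq.rfl, Bool.true_and, if_pos]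
        rw [ih]
        · simp; omega
        · simpa using Nat.le_of_succ_le_succ h
      · have hp : ¬ ([c].isPrefixOf (x :: t) = true) := by
          simp [List.isPrefixOf]; intro hc; exact absurd hc hx
        rw [if_neg hp, ih t acc (by simpa using Nat.le_of_succ_le_succ h)]
        simp [Ne.symm hx]

theorem chars_count_single (s : List Char) (c : Char) :
    PySem.Chars.count s [c] = s.count c := by
  simp only [PySem.Chars.count, List.isEmpty, reduceCtorEq, if_false]
  simpa using chars_count_go_single c s.length s 0 (le_refl _)

-- Summing the per-element counts over a duplicate-free list of keys is counting the members.
theorem sum_counts_eq_countP (vs : List Char) (hnd : vs.Nodup) (s : List Char) :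
    ((vs.map (fun v => (s.count v : Int))).sum) = (s.countP (fun x => vs.contains x) : Int) := by
  induction s with
  | nil => simp
  | cons x t ih =>
    have h1 : (vs.map (fun v => ((x :: t).count v : Int))).sum
        = (vs.map (fun v => (t.count v : Int) + (if x == v then 1 else 0))).sum := by
      congr 1
      apply List.map_congr_left
      intro v _
      simp [List.count_cons]
    rw [h1, PySem.List.sum_map_add_int, PySem.List.sum_map_ite_one_zero, ih]
    have h2 : vs.countP (fun v => x == v) = vs.count x := by
      simp only [List.count_eq_countP]
      exact List.countP_congr (fun a _ => by rw [Bool.beq_comm])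
    rw [h2, List.countP_cons]
    by_cases hx : x ∈ vs
    · rw [List.count_eq_one_of_mem hnd hx]
      simp [hx]
    · rw [List.count_eq_zero_of_not_mem hx]
      simp [hx]

-- ===== VERDICT (by name: the statement is the Claim_ definition above) =====
theorem vowel_check_spec : Claim_equal_vowel_check := by
  intro word _
  unfold Spec_vowel_check vowel_check vowel_check_alt
  simp only [PySem.Str.count_eq, String.toList_ofList]
  rw [PySem.List.foldl_if_add_one]
  have hv : ("aeiou".toList) = ['a','e','i','o','u'] := by decide
  rw [hv]
  have hc : ∀ v : Char, PySem.Chars.count (PySem.Str.lower word).toList [v]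
      = (PySem.Str.lower word).toList.count v := fun v => chars_count_single _ v
  simp only [hc]
  rw [sum_counts_eq_countP ['a','e','i','o','u'] (by decide)]
  set n := ((PySem.Str.lower word).toList.countP
      (fun x => (['a','e','i','o','u'] : List Char).contains x) : Int)
  set L := ((PySem.Str.lower word).toList.length : Int)
  show (if 0 + n > L - (0 + n) then true else false) = decide (2 * n > L)
  split_ifs with h <;> simp_all <;> omega
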